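-- pv_equiv track=rewrite | github.com/Upendra-Thunuguntla/Python-Practice | Other/MatrixOperatins - Easy.py | MatrixOperations
-- ===== SOURCE A (Python) =====
-- def MatrixOperations(matrix):
--     colPos, rowPos, colMid, rowMid = 0,0,0,(len(matrix)//2)+1
--     for index, row in enumerate(matrix):
--         if index==1:
--             colMid = (len(row)//2)+1
--         if 1 in row:
--             rowPos=index+1
--             for idx, ele in enumerate(row):
--                 if ele == 1:
--                     colPos = idx+1
--                     break
--     return abs(colMid-colPos)+abs(rowMid-rowPos)
-- ===== SOURCE B (Python) =====
-- def MatrixOperations(matrix):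
--     rowMid = len(matrix) // 2 + 1
--     colMid = len(matrix[1]) // 2 + 1 if len(matrix) > 1 else 0
--     rowPos = colPos = 0
--     for index in range(len(matrix) - 1, -1, -1):
--         row = matrix[index]
--         if 1 in row:
--             rowPos = index + 1
--             colPos = row.index(1) + 1
--             break
--     return abs(colMid - colPos) + abs(rowMid - rowPos)
-- ===== Notes on version B (the rewrite author's own statement) =====
-- stated objective: simpler
-- what changed: B computes rowMid/colMid directly outside any loop (colMid from matrix[1] only, as A effectively does) and replaces A's full forward sweep that keeps overwriting state with a reverse scan that stops at the last row containing a 1.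
import Mathlib
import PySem

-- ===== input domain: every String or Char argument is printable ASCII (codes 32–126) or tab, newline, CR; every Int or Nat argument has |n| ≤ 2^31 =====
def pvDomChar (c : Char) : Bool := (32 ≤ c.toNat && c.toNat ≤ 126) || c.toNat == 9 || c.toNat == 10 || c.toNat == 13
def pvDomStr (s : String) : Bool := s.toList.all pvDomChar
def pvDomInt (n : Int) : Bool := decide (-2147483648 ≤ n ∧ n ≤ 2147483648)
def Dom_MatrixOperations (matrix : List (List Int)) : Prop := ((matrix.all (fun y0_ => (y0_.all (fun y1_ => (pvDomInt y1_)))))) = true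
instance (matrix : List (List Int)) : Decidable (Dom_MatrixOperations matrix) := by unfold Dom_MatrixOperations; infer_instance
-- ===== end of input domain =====

-- B computes rowMid/colMid directly outside any loop and finds the last row
-- containing a 1 by a reverse scan that stops at the first hit (objective: simpler).

-- ===== PORT A =====
-- inner loop: 'for idx, ele in enumerate(row): if ele == 1: colPos = idx+1; break'
def pvInnerA (row : List Int) (idx : Nat) (colPos : Int) : Int :=
  match row with
  | [] => colPos
  | e :: rest => if e = 1 then (idx : Int) + 1 else pvInnerA rest (idx + 1) colPos

-- outer loop over enumerate(matrix); state = (colPos, rowPos, colMid)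
def pvLoopA (rows : List (List Int)) (index : Nat) (st : Int × Int × Int) : Int × Int × Int :=
  match rows with
  | [] => st
  | row :: rest =>
    let colMid := if index = 1 then ((row.length / 2 : Nat) : Int) + 1 else st.2.2
    let st' : Int × Int × Int :=
      if 1 ∈ row then (pvInnerA row 0 st.1, (index : Int) + 1, colMid)
      else (st.1, st.2.1, colMid)
    pvLoopA rest (index + 1) st'

def MatrixOperations (matrix : List (List Int)) : Int :=
  let rowMid : Int := ((matrix.length / 2 : Nat) : Int) + 1
  let st := pvLoopA matrix 0 (0, 0, 0)
  |st.2.2 - st.1| + |rowMid - st.2.1|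

-- ===== PORT B =====
-- rows enumerated from i (Python's index bookkeeping in the reverse loop)
def pvEnumFrom (i : Nat) (rows : List (List Int)) : List (Nat × List Int) :=
  match rows with
  | [] => []
  | r :: rs => (i, r) :: pvEnumFrom (i + 1) rs

-- reverse scan with break: first element (from the back) whose row contains 1
def pvLoopB (rows : List (Nat × List Int)) : Int × Int :=
  match rows with
  | [] => (0, 0)
  | (i, row) :: rest =>
    if 1 ∈ row then (((PySem.List.index? row 1).getD 0 : Int) + 1, (i : Int) + 1)
    else pvLoopB rest

def MatrixOperations_alt (matrix : List (List Int)) : Int :=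
  let rowMid : Int := ((matrix.length / 2 : Nat) : Int) + 1
  let colMid : Int :=
    if 1 < matrix.length then (((matrix.getD 1 []).length / 2 : Nat) : Int) + 1 else 0
  let p := pvLoopB (pvEnumFrom 0 matrix).reverse
  |colMid - p.1| + |rowMid - p.2|

-- ===== PRECONDITION & SPEC =====
def Spec_MatrixOperations (matrix : List (List Int)) (out : Int) : Prop := out = MatrixOperations_alt matrix
instance (matrix : List (List Int)) (out : Int) : Decidable (Spec_MatrixOperations matrix out) := by unfold Spec_MatrixOperations; infer_instance

-- ===== CLAIM (what is proved, stated in full; the proofs are below) =====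
def Claim_equal_MatrixOperations : Prop := ∀ (matrix : List (List Int)), Dom_MatrixOperations matrix → Spec_MatrixOperations matrix (MatrixOperations matrix)

-- ===== LEMMAS AND PROOFS =====

-- A's inner loop computes (first index of 1) + 1 when 1 ∈ row
theorem pvInnerA_eq (row : List Int) (i : Nat) (cp : Int) :
    pvInnerA row i cp =
      match PySem.List.index? row 1 with
      | some k => ((i + k : Nat) : Int) + 1
      | none => cp := by
  induction row generalizing i with
  | nil => simp [pvInnerA, PySem.List.index?]
  | cons e rest ih =>
    by_cases h : e = 1
    · subst h
      rw [PySem.List.index?_cons_self]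
      simp [pvInnerA]
    · rw [PySem.List.index?_cons_of_ne rest h]
      simp only [pvInnerA, if_neg h, ih (i + 1)]
      cases hk : PySem.List.index? rest 1 <;> simp <;> omega

theorem pvLoopB_append (xs ys : List (Nat × List Int)) :
    pvLoopB (xs ++ ys) =
      if xs.any (fun p => decide (1 ∈ p.2)) then pvLoopB xs else pvLoopB ys := by
  induction xs with
  | nil => simp
  | cons x rest ih =>
    obtain ⟨i, row⟩ := x
    by_cases h : 1 ∈ row
    · simp [pvLoopB, h]
    · have hl : pvLoopB ((i, row) :: (rest ++ ys)) = pvLoopB (rest ++ ys) := by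
        simp [pvLoopB, h]
      have hr : pvLoopB ((i, row) :: rest) = pvLoopB rest := by simp [pvLoopB, h]
      rw [List.cons_append, hl, ih, List.any_cons, decide_eq_false h, Bool.false_or, hr]

theorem pvEnumFrom_any (i : Nat) (rows : List (List Int)) :
    (pvEnumFrom i rows).any (fun p => decide (1 ∈ p.2)) = rows.any (fun r => decide (1 ∈ r)) := by
  induction rows generalizing i with
  | nil => rfl
  | cons r rs ih => simp [pvEnumFrom, List.any_cons, ih]

-- position components of A's loop = B's reverse scan (or the incoming state if no row hits)
theorem pvLoopA_pos (rows : List (List Int)) (index : Nat) (cp rp cm : Int) :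
    ((pvLoopA rows index (cp, rp, cm)).1, (pvLoopA rows index (cp, rp, cm)).2.1) =
      if rows.any (fun r => decide (1 ∈ r)) then pvLoopB (pvEnumFrom index rows).reverse
      else (cp, rp) := by
  induction rows generalizing index cp rp cm with
  | nil => simp [pvLoopA]
  | cons row rest ih =>
    have hrev : (pvEnumFrom index (row :: rest)).reverse
        = (pvEnumFrom (index + 1) rest).reverse ++ [(index, row)] := by
      simp [pvEnumFrom]
    rw [List.any_cons, hrev, pvLoopB_append]
    have hany : ((pvEnumFrom (index + 1) rest).reverse.any (fun p => decide (1 ∈ p.2)))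
        = rest.any (fun r => decide (1 ∈ r)) := by
      rw [List.any_reverse, pvEnumFrom_any]
    rw [hany]
    by_cases h : 1 ∈ row
    · simp only [pvLoopA, if_pos h, ih]
      by_cases h2 : rest.any (fun r => decide (1 ∈ r)) = true
      · simp [h, h2]
      · obtain ⟨k, hk⟩ := Option.isSome_iff_exists.mp
          ((PySem.List.index?_isSome_iff (xs := row) (v := 1)).mpr h)
        rw [PySem.List.index?_eq_idxOf?] at hk
        simp [pvLoopB, h, h2, pvInnerA_eq, hk]
    · simp only [pvLoopA, if_neg h, ih]
      by_cases h2 : rest.any (fun r => decide (1 ∈ r)) = true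
      · simp [h, h2]
      · simp [h, h2]

-- if no row contains a 1, B's reverse scan returns the initial (0, 0)
theorem pvLoopB_no_hit (xs : List (Nat × List Int))
    (h : xs.any (fun p => decide (1 ∈ p.2)) = false) : pvLoopB xs = (0, 0) := by
  induction xs with
  | nil => rfl
  | cons x rest ih =>
    obtain ⟨i, row⟩ := x
    simp only [List.any_cons, Bool.or_eq_false_iff, decide_eq_false_iff_not] at h
    simp [pvLoopB, h.1, ih h.2]

-- colMid is never touched once index ≥ 2
theorem pvLoopA_cm_ge2 (rows : List (List Int)) (index : Nat) (st : Int × Int × Int)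
    (h : 2 ≤ index) : (pvLoopA rows index st).2.2 = st.2.2 := by
  induction rows generalizing index st with
  | nil => rfl
  | cons row rest ih =>
    have hne : index ≠ 1 := by omega
    simp only [pvLoopA, if_neg hne]
    split <;> exact ih (index + 1) _ (by omega)

theorem pvLoopA_cm (matrix : List (List Int)) :
    (pvLoopA matrix 0 (0, 0, 0)).2.2 =
      if 1 < matrix.length then (((matrix.getD 1 []).length / 2 : Nat) : Int) + 1 else 0 := by
  match matrix with
  | [] => rfl
  | [r0] =>
    simp only [pvLoopA]
    split <;> rfl
  | r0 :: r1 :: rest =>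
    simp only [pvLoopA]
    rw [show (0 + 1) = 1 from rfl]
    have h2 : (2 : Nat) ≤ 0 + 1 + 1 := by omega
    split <;> split <;>
      simp [pvLoopA_cm_ge2 _ _ _ h2, List.getD, List.length]

-- ===== VERDICT (by name: the statement is the Claim_ definition above) =====
theorem MatrixOperations_spec : Claim_equal_MatrixOperations := by
  intro matrix _
  unfold Spec_MatrixOperations MatrixOperations MatrixOperations_alt
  have hpos := pvLoopA_pos matrix 0 0 0 0
  have hcm := pvLoopA_cm matrix
  by_cases h : matrix.any (fun r => decide (1 ∈ r)) = true
  · rw [if_pos h] at hpos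
    have h1 := congrArg Prod.fst hpos
    have h2 := congrArg Prod.snd hpos
    simp only at h1 h2
    simp [h1, h2, hcm]
  · rw [if_neg h] at hpos
    have h1 := congrArg Prod.fst hpos
    have h2 := congrArg Prod.snd hpos
    simp only at h1 h2
    have hb : pvLoopB (pvEnumFrom 0 matrix).reverse = (0, 0) :=
      pvLoopB_no_hit _ (by rw [List.any_reverse, pvEnumFrom_any]; simpa using h)
    simp [h1, h2, hcm, hb]
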